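-- pv_equiv track=rewrite | github.com/chem-rano/eigensolvers | analyzerScripts/makeBatch.py | group_by_interval
-- ===== SOURCE A (Python) =====
-- def group_by_interval(arr, interval):
--     if not arr:
--         return []
--
--     # Sort the array to make grouping easier
--     arr.sort()
--
--     groups = []
--     current_group = [arr[0]]
--
--     for i in range(1, len(arr)):
--         # Check if the current element fits in the current group
--         if arr[i] - current_group[0] <= interval:
--             current_group.append(arr[i])
--         else:
--             groups.append(current_group)
--             current_group = [arr[i]]
--
--     # Add the last group
--     groups.append(current_group)
--     return groups
-- ===== SOURCE B (Python) =====
-- def group_by_interval(arr, interval):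
--     arr.sort()
--     n = len(arr)
--     groups = []
--     i = 0
--     while i < n:
--         limit = arr[i] + interval
--         # binary search (bisect_right) for the first j in (i, n] with arr[j] > limit
--         lo, hi = i + 1, n
--         while lo < hi:
--             mid = (lo + hi) // 2
--             if arr[mid] <= limit:
--                 lo = mid + 1
--             else:
--                 hi = mid
--         groups.append(arr[i:lo])
--         i = lo
--     return groups
-- ===== Notes on version B (the rewrite author's own statement) =====
-- stated objective: alternative
-- what changed: Instead of A's single greedy pass that accumulates a running current_group element by element, B locates each group's right boundary with a hand-written binary search (bisect_right for anchor+interval) over the sorted array and slices the group out, doing O(g log n) comparisons after the sort instead of O(n).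
import Mathlib
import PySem

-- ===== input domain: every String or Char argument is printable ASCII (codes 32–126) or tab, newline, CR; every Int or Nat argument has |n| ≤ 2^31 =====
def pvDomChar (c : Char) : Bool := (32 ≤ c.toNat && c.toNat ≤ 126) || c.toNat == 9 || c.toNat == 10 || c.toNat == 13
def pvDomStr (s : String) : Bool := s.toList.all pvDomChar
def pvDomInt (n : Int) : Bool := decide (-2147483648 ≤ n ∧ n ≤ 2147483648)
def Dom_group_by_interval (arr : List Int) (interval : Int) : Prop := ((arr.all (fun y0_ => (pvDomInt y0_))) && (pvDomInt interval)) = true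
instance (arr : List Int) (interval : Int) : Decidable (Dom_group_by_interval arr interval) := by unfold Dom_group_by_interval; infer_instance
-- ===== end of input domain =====

-- B replaces A's element-by-element greedy accumulation with a binary search (bisect_right)
-- for each group's right boundary (same overall cost); both sort arr in place in Python —
-- the equivalence proved here is about the return value.


-- ===== PORT A =====
-- loop body of A's for-loop (the if/else on arr[i] against current_group[0])
def aStep (interval : Int) (st : List (List Int) × List Int) (x : Int) : List (List Int) × List Int :=
  if x - PySem.List.pyGetD st.2 0 0 ≤ interval then (st.1, st.2 ++ [x])
  else (st.1 ++ [st.2], [x])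

def group_by_interval (arr : List Int) (interval : Int) : List (List Int) :=
  if arr = [] then []
  else
    let s := PySem.List.sorted arr (fun x => x) false
    let st := (PySem.List.pyRange 1 (s.length : Int) 1).foldl
      (fun st i => aStep interval st (PySem.List.pyGetD s i 0))
      ([], [PySem.List.pyGetD s 0 0])
    st.1 ++ [st.2]

-- ===== PORT B =====
-- inner `while lo < hi` binary search of Source B (arr[mid] via pyGetD; (lo+hi)//2 on Nat = Python //;
-- structural fuel = hi - lo, an upper bound on the iteration count, makes the loop total)
def bsearch (s : List Int) (limit : Int) : Nat → Nat → Nat → Nat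
  | 0, lo, _hi => lo
  | fuel + 1, lo, hi =>
      if lo < hi then
        let mid := (lo + hi) / 2
        if PySem.List.pyGetD s (mid : Int) 0 ≤ limit then bsearch s limit fuel (mid + 1) hi
        else bsearch s limit fuel lo mid
      else lo

-- outer `while i < n` loop of Source B (groups accumulator; arr[i:lo] via PySem slice; fuel = n - i)
def altOuter (s : List Int) (interval : Int) : Nat → List (List Int) → Nat → List (List Int)
  | 0, groups, _i => groups
  | fuel + 1, groups, i =>
      if i < s.length then
        let limit := PySem.List.pyGetD s (i : Int) 0 + interval
        let lo := bsearch s limit (s.length - (i + 1)) (i + 1) s.length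
        altOuter s interval fuel (groups ++ [PySem.List.slice s (some (i : Int)) (some (lo : Int))]) lo
      else groups

def group_by_interval_alt (arr : List Int) (interval : Int) : List (List Int) :=
  altOuter (PySem.List.sorted arr (fun x => x) false) interval
    (PySem.List.sorted arr (fun x => x) false).length [] 0

-- ===== PRECONDITION & SPEC =====
def Spec_group_by_interval (arr : List Int) (interval : Int) (out : List (List Int)) : Prop := out = group_by_interval_alt arr interval
instance (arr : List Int) (interval : Int) (out : List (List Int)) : Decidable (Spec_group_by_interval arr interval out) := by unfold Spec_group_by_interval; infer_instance

-- ===== CLAIM =====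
def Claim_equal_group_by_interval : Prop := ∀ (arr : List Int) (interval : Int), Dom_group_by_interval arr interval → Spec_group_by_interval arr interval (group_by_interval arr interval)

-- ===== LEMMAS AND PROOFS =====

-- proof-side intermediate: the greedy chunk decomposition both programs compute
def altCount (xs : List Int) (anchor interval : Int) : Nat :=
  match xs with
  | [] => 0
  | x :: rest => if x - anchor ≤ interval then 1 + altCount rest anchor interval else 0

def altChunks (s : List Int) (interval : Int) : List (List Int) :=
  match s with
  | [] => []
  | x :: xs =>
      let k := altCount xs x interval
      (x :: xs.take k) :: altChunks (xs.drop k) interval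
termination_by s.length
decreasing_by simp

theorem altChunks_nil (interval : Int) : altChunks [] interval = [] := by
  rw [altChunks.eq_def]

theorem altChunks_cons (x : Int) (xs : List Int) (interval : Int) :
    altChunks (x :: xs) interval
      = (x :: xs.take (altCount xs x interval))
          :: altChunks (xs.drop (altCount xs x interval)) interval := by
  rw [altChunks.eq_def]

-- A's loop over the tail, with the final flush of current_group, produces exactly the chunks.
theorem loop_eq_chunks (interval : Int) (t : List Int) :
    ∀ (gs : List (List Int)) (anchor : Int) (cur : List Int),
    (t.foldl (aStep interval) (gs, anchor :: cur)).1
      ++ [(t.foldl (aStep interval) (gs, anchor :: cur)).2]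
    = gs ++ ((anchor :: cur ++ t.take (altCount t anchor interval))
              :: altChunks (t.drop (altCount t anchor interval)) interval) := by
  induction t with
  | nil => intro gs anchor cur; simp [altCount, altChunks_nil]
  | cons x rest ih =>
      intro gs anchor cur
      by_cases h : x - anchor ≤ interval
      · simp only [List.foldl_cons, aStep, PySem.List.pyGetD_zero_cons, if_pos h, altCount]
        rw [show (anchor :: cur) ++ [x] = anchor :: (cur ++ [x]) from by simp]
        rw [ih gs anchor (cur ++ [x])]
        simp [Nat.add_comm 1]
      · simp only [List.foldl_cons, aStep, PySem.List.pyGetD_zero_cons, if_neg h, altCount]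
        rw [ih (gs ++ [anchor :: cur]) x []]
        simp [altChunks_cons]

-- characterisation of the binary search on a sorted list
theorem bsearch_spec (s : List Int) (hs : s.Pairwise (· ≤ ·)) (limit : Int) :
    ∀ (fuel lo hi : Nat), hi - lo ≤ fuel → lo ≤ hi → hi ≤ s.length →
      lo ≤ bsearch s limit fuel lo hi ∧ bsearch s limit fuel lo hi ≤ hi ∧
      (∀ k (hk : k < s.length), lo ≤ k → k < bsearch s limit fuel lo hi → s[k] ≤ limit) ∧
      (bsearch s limit fuel lo hi < hi → ∀ (hk : bsearch s limit fuel lo hi < s.length),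
        limit < s[bsearch s limit fuel lo hi]) := by
  have mono : ∀ (p q : Nat) (hq : q < s.length) (hpq : p ≤ q), s[p]'(by omega) ≤ s[q] := by
    intro p q hq hpq
    rcases Nat.lt_or_ge p q with h | h
    · exact List.pairwise_iff_getElem.mp hs p q (by omega) hq h
    · have : p = q := by omega
      subst this; exact le_refl _
  intro fuel
  induction fuel with
  | zero =>
      intro lo hi hn hlh hhs
      simp only [bsearch]
      exact ⟨le_refl _, hlh, fun k hk h1 h2 => absurd (lt_of_le_of_lt h1 h2) (lt_irrefl _),
        fun hlt => absurd hlt (by omega)⟩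
  | succ n ih =>
      intro lo hi hn hlh hhs
      simp only [bsearch]
      split
      · rename_i hlohi
        have hmid : (lo + hi) / 2 < s.length := by omega
        have hget : PySem.List.pyGetD s (((lo + hi) / 2 : Nat) : Int) 0 = s[(lo + hi) / 2] := by
          rw [PySem.List.pyGetD_natCast, List.getD_eq_getElem s 0 hmid]
        split
        · rename_i hle
          rw [hget] at hle
          obtain ⟨h1, h2, h3, h4⟩ := ih ((lo + hi) / 2 + 1) hi (by omega) (by omega) hhs
          refine ⟨by omega, h2, ?_, h4⟩
          intro k hk hk1 hk2
          rcases Nat.lt_or_ge k ((lo + hi) / 2 + 1) with hc | hc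
          · exact le_trans (mono k ((lo + hi) / 2) hmid (by omega)) hle
          · exact h3 k hk hc hk2
        · rename_i hgt
          rw [hget, not_le] at hgt
          obtain ⟨h1, h2, h3, h4⟩ := ih lo ((lo + hi) / 2) (by omega) (by omega) (by omega)
          refine ⟨h1, by omega, h3, ?_⟩
          intro _ hk
          rcases Nat.lt_or_ge (bsearch s limit n lo ((lo + hi) / 2)) ((lo + hi) / 2) with hc | hc
          · exact h4 hc hk
          · have heq : bsearch s limit n lo ((lo + hi) / 2) = (lo + hi) / 2 := by omega
            have hrw : s[bsearch s limit n lo ((lo + hi) / 2)]'hk = s[(lo + hi) / 2]'hmid := by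
              simp [heq]
            rw [hrw]
            exact hgt
      · rename_i hge
        exact ⟨le_refl _, hlh, fun k hk h1 h2 => absurd (lt_of_le_of_lt h1 h2) (lt_irrefl _),
          fun hlt => absurd hlt (by omega)⟩

-- altCount counts the leading elements within the interval
theorem altCount_eq (a iv : Int) :
    ∀ (t : List Int) (k : Nat), k ≤ t.length →
      (∀ m (hm : m < t.length), m < k → t[m] - a ≤ iv) →
      (∀ (hk : k < t.length), ¬ (t[k] - a ≤ iv)) →
      altCount t a iv = k := by
  intro t
  induction t with
  | nil => intro k hk _ _; simp at hk; simp [altCount, hk]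
  | cons x rest ih =>
      intro k hk h2 h3
      match k with
      | 0 =>
          have := h3 (by simp)
          simp at this
          simp [altCount, this]
      | k' + 1 =>
          have hx : x - a ≤ iv := h2 0 (by simp) (by omega)
          simp only [altCount, if_pos hx]
          have := ih k' (by simp at hk; omega)
            (fun m hm hmk => h2 (m + 1) (by simp; omega) (by omega))
            (fun hkl => h3 (by simp; omega))
          omega

-- the outer while-loop unrolls to the chunk decomposition on a sorted list
theorem altOuter_eq (s : List Int) (hs : s.Pairwise (· ≤ ·)) (interval : Int) :
    ∀ (fuel i : Nat) (groups : List (List Int)), s.length - i ≤ fuel →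
      altOuter s interval fuel groups i = groups ++ altChunks (s.drop i) interval := by
  intro fuel
  induction fuel with
  | zero =>
      intro i groups hn
      simp only [altOuter]
      rw [List.drop_eq_nil_of_le (by omega), altChunks_nil, List.append_nil]
  | succ n ih =>
      intro i groups hn
      simp only [altOuter]
      split
      · rename_i hi
        have hgeta : PySem.List.pyGetD s ((i : Nat) : Int) 0 = s[i] := by
          rw [PySem.List.pyGetD_natCast, List.getD_eq_getElem s 0 hi]
        set limit := PySem.List.pyGetD s ((i : Nat) : Int) 0 + interval with hlimit
        set j := bsearch s limit (s.length - (i + 1)) (i + 1) s.length with hj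
        obtain ⟨hj1, hj2, hj3, hj4⟩ := bsearch_spec s hs limit (s.length - (i + 1)) (i + 1) s.length
          (le_refl _) (by omega) (le_refl _)
        rw [← hj] at hj1 hj2 hj3 hj4
        -- the group's length
        have hcnt : altCount (s.drop (i + 1)) s[i] interval = j - (i + 1) := by
          apply altCount_eq
          · simp; omega
          · intro m hm hmk
            have hlt : i + 1 + m < s.length := by simp at hm; omega
            rw [List.getElem_drop]
            have h5 := hj3 (i + 1 + m) hlt (by omega) (by omega)
            rw [hlimit, hgeta] at h5; omega
          · intro hkl
            have hjlen : j < s.length := by simp at hkl; omega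
            have h5 := hj4 (by omega) hjlen
            rw [hlimit, hgeta] at h5
            rw [List.getElem_drop]
            have hidx : i + 1 + (j - (i + 1)) = j := by omega
            simp only [hidx]
            omega
        rw [ih j (groups ++ [PySem.List.slice s (some ((i : Nat) : Int)) (some ((j : Nat) : Int))]) (by omega)]
        rw [List.drop_eq_getElem_cons hi, altChunks_cons, hcnt]
        rw [PySem.List.slice_natCast]
        rw [List.drop_eq_getElem_cons hi]
        have htake : (s[i] :: s.drop (i + 1)).take (j - i)
            = s[i] :: (s.drop (i + 1)).take (j - (i + 1)) := by
          have : j - i = (j - (i + 1)) + 1 := by omega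
          rw [this, List.take_succ_cons]
        rw [htake, List.drop_drop]
        have : i + 1 + (j - (i + 1)) = j := by omega
        rw [this]
        simp
      · rename_i hi
        rw [List.drop_eq_nil_of_le (by omega), altChunks_nil, List.append_nil]

-- ===== VERDICT =====
theorem group_by_interval_spec : Claim_equal_group_by_interval := by
  intro arr interval _
  unfold Spec_group_by_interval group_by_interval group_by_interval_alt
  have hsort : (PySem.List.sorted arr (fun x => x) false).Pairwise (· ≤ ·) :=
    PySem.List.sorted_pairwise arr (fun x => x)
  rw [altOuter_eq _ hsort interval _ 0 [] (by omega), List.drop_zero, List.nil_append]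
  by_cases harr : arr = []
  · subst harr; simp [PySem.List.sorted, altChunks_nil]
  · simp only [if_neg harr]
    have hs : PySem.List.sorted arr (fun x => x) false ≠ [] := by
      intro h
      exact harr (List.Perm.eq_nil ((PySem.List.sorted_perm arr (fun x => x) false).symm.trans (h ▸ List.Perm.refl _)))
    obtain ⟨h, t, hst⟩ := List.exists_cons_of_ne_nil hs
    rw [hst]
    have hfold := PySem.List.foldl_pyRange_pyGetD' (h :: t) 0 (aStep interval)
      ([], [PySem.List.pyGetD (h :: t) 0 0]) (a := 1) (by norm_num)
    simp only [PySem.List.pyGetD_zero_cons] at hfold ⊢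
    rw [hfold]
    rw [altChunks_cons]
    simpa using loop_eq_chunks interval t [] h []
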